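-- pv_equiv track=rewrite | github.com/matiFlow/Python- | prog2_practico_3_2022.py | traducir
-- ===== SOURCE A (Python) =====
-- def traducir(d:dict, frase:str) -> str:
--     d = {'the':'el','dog':'perro'}
--     palabras = frase.split()
--     texto = ''
--     for i in palabras:
--         if d.get(i):
--             texto = d.get(i)
--     return texto
-- ===== SOURCE B (Python) =====
-- def traducir(d: dict, frase: str) -> str:
--     tabla = {'the': 'el', 'dog': 'perro'}
--     for w in reversed(frase.split()):
--         t = tabla.get(w)
--         if t:
--             return t
--     return ''
-- ===== Notes on version B (the rewrite author's own statement) =====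
-- stated objective: idiomatic
-- what changed: B scans the split words from the end and returns the translation of the first dictionary hit (early exit), instead of A's forward scan that overwrites an accumulator on every hit.
import Mathlib
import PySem

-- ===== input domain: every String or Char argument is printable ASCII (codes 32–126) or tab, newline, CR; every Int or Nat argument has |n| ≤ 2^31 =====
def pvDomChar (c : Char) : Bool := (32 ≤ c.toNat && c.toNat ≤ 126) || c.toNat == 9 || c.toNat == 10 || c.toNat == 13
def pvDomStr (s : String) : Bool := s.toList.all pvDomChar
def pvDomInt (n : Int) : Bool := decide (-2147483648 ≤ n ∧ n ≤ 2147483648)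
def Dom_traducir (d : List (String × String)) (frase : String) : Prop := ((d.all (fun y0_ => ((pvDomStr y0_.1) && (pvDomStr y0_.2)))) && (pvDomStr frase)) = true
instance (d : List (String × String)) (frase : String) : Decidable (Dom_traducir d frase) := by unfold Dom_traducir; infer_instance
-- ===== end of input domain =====

-- B scans the split words from the end, returning the first dictionary hit (early exit),
-- instead of A's forward scan overwriting an accumulator; the passed `d` is ignored by both.

-- ===== PORT A =====
-- the dict literal A rebinds `d` to
def pvTabla : PySem.Dict String String := PySem.Dict.ofList [("the", "el"), ("dog", "perro")]

def traducir (d : List (String × String)) (frase : String) : String :=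
  let palabras := PySem.Str.split₀ frase
  palabras.foldl (fun texto i =>
    match pvTabla.get? i with
    | some s => if s ≠ "" then s else texto   -- `if d.get(i): texto = d.get(i)` (truthiness of str)
    | none => texto) ""

-- ===== PORT B =====
-- first truthy translation in the given word list (B iterates reversed(frase.split()))
def pvFirstTrad : List String → String
  | [] => ""
  | w :: ws =>
    match pvTabla.get? w with
    | some t => if t ≠ "" then t else pvFirstTrad ws
    | none => pvFirstTrad ws

def traducir_alt (d : List (String × String)) (frase : String) : String :=
  pvFirstTrad (PySem.Str.split₀ frase).reverse

-- ===== PRECONDITION & SPEC =====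
def Spec_traducir (d : List (String × String)) (frase : String) (out : String) : Prop := out = traducir_alt d frase
instance (d : List (String × String)) (frase : String) (out : String) : Decidable (Spec_traducir d frase out) := by unfold Spec_traducir; infer_instance

-- ===== CLAIM (what is proved, stated in full; the proofs are below) =====
def Claim_equal_traducir : Prop := ∀ (d : List (String × String)) (frase : String), Dom_traducir d frase → Spec_traducir d frase (traducir d frase)

-- ===== LEMMAS AND PROOFS =====

-- pvFirstTrad of a snoc: the trailing word only matters if nothing before it matched
theorem pvFirstTrad_append_singleton (xs : List String) (w : String) :
    pvFirstTrad (xs ++ [w]) =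
      if pvFirstTrad xs = "" then pvFirstTrad [w] else pvFirstTrad xs := by
  induction xs with
  | nil => simp [pvFirstTrad]
  | cons x xs ih =>
    simp only [List.cons_append, pvFirstTrad, ih]
    cases h : pvTabla.get? x with
    | none => simp [h]
    | some t => by_cases ht : t = "" <;> simp [h, ht] <;> split_ifs <;> simp_all

-- the foldl of A equals: B's reversed first-match, with the accumulator as fallback
theorem foldl_eq_firstTrad (ws : List String) (acc : String) :
    ws.foldl (fun texto i =>
      match pvTabla.get? i with
      | some s => if s ≠ "" then s else texto
      | none => texto) acc =
    (if pvFirstTrad ws.reverse = "" then acc else pvFirstTrad ws.reverse) := by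
  induction ws generalizing acc with
  | nil => simp [pvFirstTrad]
  | cons w ws ih =>
    simp only [List.foldl_cons, List.reverse_cons, ih,
      pvFirstTrad_append_singleton]
    cases h : pvTabla.get? w with
    | none => simp only [pvFirstTrad, h]; split_ifs <;> simp_all
    | some t =>
      by_cases ht : t = "" <;>
        · simp only [pvFirstTrad, h, ht, if_neg, if_pos, ne_eq, not_true_eq_false,
            not_false_eq_true, ite_false, ite_true]
          split_ifs <;> simp_all

-- ===== VERDICT (by name: the statement is the Claim_ definition above) =====
theorem traducir_spec : Claim_equal_traducir := by
  intro d frase _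
  unfold Spec_traducir traducir traducir_alt
  rw [foldl_eq_firstTrad]
  split_ifs <;> simp_all
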